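-- pv_equiv track=rewrite | github.com/ogchen/nanofold | nanofold/preprocess/sto_parser.py | compute_deletion_matrix
-- ===== SOURCE A (Python) =====
-- def compute_deletion_matrix(alignments):
--     query = alignments[0]
--     deletion_matrix = []
--
--     for sequence in alignments:
--         deletion_row = []
--         deletion_count = 0
--         for seq_res, query_res in zip(sequence, query):
--             if seq_res != "-" and query_res == "-":
--                 deletion_count += 1
--             elif query_res != "-":
--                 deletion_row.append(deletion_count)
--                 deletion_count = 0
--         deletion_matrix.append(deletion_row)
--     return deletion_matrix
-- ===== SOURCE B (Python) =====
-- def compute_deletion_matrix(alignments):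
--     query = alignments[0]
--     # Segmentation of the query: for each match column i (query[i] != '-'),
--     # record the indices of the gap columns accumulated since the previous
--     # match column; a trailing gap run after the last match column is dropped.
--     segments = []
--     run = []
--     for i, res in enumerate(query):
--         if res == "-":
--             run.append(i)
--         else:
--             segments.append((run, i))
--             run = []
--     # One row per sequence: count non-gap residues of the sequence inside each
--     # gap block; zip-truncation is reproduced by keeping only segments whose
--     # match column lies inside the sequence.
--     return [
--         [sum(1 for j in gaps if seq[j] != "-") for gaps, m in segments if m < len(seq)]
--         for seq in alignments
--     ]
-- ===== Notes on version B (the rewrite author's own statement) =====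
-- stated objective: alternative
-- what changed: B precomputes once, from the query alone, the gap-block segmentation (gap indices per match column), then builds each row by counting non-gap residues per block, instead of A's per-sequence stateful scan over zip(sequence, query).
-- outside the precondition, e.g. on compute_deletion_matrix([]): A raises IndexError, B raises IndexError
import Mathlib
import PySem

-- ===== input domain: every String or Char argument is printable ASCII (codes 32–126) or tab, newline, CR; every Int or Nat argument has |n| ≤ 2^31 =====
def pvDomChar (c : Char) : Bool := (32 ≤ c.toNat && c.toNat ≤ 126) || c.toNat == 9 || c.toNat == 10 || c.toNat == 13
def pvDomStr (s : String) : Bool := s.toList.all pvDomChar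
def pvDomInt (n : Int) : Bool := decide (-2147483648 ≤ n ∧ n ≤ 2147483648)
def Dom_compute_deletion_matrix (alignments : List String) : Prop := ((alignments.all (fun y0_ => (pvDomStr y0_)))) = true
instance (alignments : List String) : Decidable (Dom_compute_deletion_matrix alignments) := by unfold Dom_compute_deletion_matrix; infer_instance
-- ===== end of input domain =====

-- B replaces A's per-sequence stateful scan over zip(sequence, query) by a query-driven
-- segmentation (gap indices per match column) computed once, then per-block counting per row.


-- ===== PORT A =====
-- A's inner for-loop over zip(sequence, query) with state (deletion_row, deletion_count)
def pvAGo : List (Char × Char) → List Int → Int → List Int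
  | [], row, _ => row
  | p :: rest, row, c =>
    if p.1 ≠ '-' ∧ p.2 = '-' then pvAGo rest row (c + 1)
    else if p.2 ≠ '-' then pvAGo rest (row ++ [c]) 0
    else pvAGo rest row c

def compute_deletion_matrix (alignments : List String) : List (List Int) :=
  match alignments with
  | [] => []   -- alignments[0] raises IndexError in Python; excluded by Pre_
  | q :: _ => alignments.map (fun s => pvAGo (s.toList.zip q.toList) [] 0)

-- ===== PORT B =====
-- B's for-loop over enumerate(query) with state (segments, run); trailing run dropped
def pvSegs : List Char → Nat → List Nat → List (List Nat × Nat)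
  | [], _, _ => []
  | c :: cs, k, run =>
    if c = '-' then pvSegs cs (k + 1) (run ++ [k])
    else (run, k) :: pvSegs cs (k + 1) []

-- sum(1 for j in gaps if seq[j] != '-'); getD is exact: under the m < len(seq) filter
-- every gap index j satisfies j < m < len(seq)
def pvCnt (seq : List Char) (gaps : List Nat) : Int :=
  ((gaps.filter (fun j => seq.getD j '-' != '-')).length : Int)

def compute_deletion_matrix_alt (alignments : List String) : List (List Int) :=
  match alignments with
  | [] => []   -- alignments[0] raises IndexError in Python; excluded by Pre_
  | q :: _ =>
    let segs := pvSegs q.toList 0 []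
    alignments.map (fun s =>
      (segs.filter (fun p => decide (p.2 < s.toList.length))).map (fun p => pvCnt s.toList p.1))

-- ===== PRECONDITION & SPEC =====
-- Pre_ excludes only the empty list, on which A raises IndexError at alignments[0]
def Pre_compute_deletion_matrix (alignments : List String) : Prop := alignments ≠ []
instance (alignments : List String) : Decidable (Pre_compute_deletion_matrix alignments) := by
  unfold Pre_compute_deletion_matrix; infer_instance

def pvWitness_compute_deletion_matrix : List String := ["A--B", "AC-B", "----"]

def Spec_compute_deletion_matrix (alignments : List String) (out : List (List Int)) : Prop := out = compute_deletion_matrix_alt alignments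
instance (alignments : List String) (out : List (List Int)) : Decidable (Spec_compute_deletion_matrix alignments out) := by unfold Spec_compute_deletion_matrix; infer_instance

-- ===== CLAIM (what is proved, stated in full; the proofs are below) =====
def Claim_equal_compute_deletion_matrix : Prop := ∀ (alignments : List String), Dom_compute_deletion_matrix alignments → Pre_compute_deletion_matrix alignments → Spec_compute_deletion_matrix alignments (compute_deletion_matrix alignments)

-- ===== LEMMAS AND PROOFS =====

-- accumulator-free form of A's inner loop
def pvSpecZ : List (Char × Char) → Int → List Int
  | [], _ => []
  | p :: rest, c =>
    if p.1 ≠ '-' ∧ p.2 = '-' then pvSpecZ rest (c + 1)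
    else if p.2 ≠ '-' then c :: pvSpecZ rest 0
    else pvSpecZ rest c

theorem pvAGo_eq (l : List (Char × Char)) : ∀ (row : List Int) (c : Int),
    pvAGo l row c = row ++ pvSpecZ l c := by
  induction l with
  | nil => intro row c; simp [pvAGo, pvSpecZ]
  | cons p rest ih =>
    intro row c
    simp only [pvAGo, pvSpecZ]
    split_ifs with h1 h2 <;> simp [ih]

theorem pvCnt_append (S : List Char) (run : List Nat) (k : Nat) :
    pvCnt S (run ++ [k]) = pvCnt S run + (if S.getD k '-' ≠ '-' then 1 else 0) := by
  simp [pvCnt, List.filter_append]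
  split_ifs with h <;> simp [h]

theorem pvSegs_cons_gap (cs : List Char) (k : Nat) (run : List Nat) :
    pvSegs ('-' :: cs) k run = pvSegs cs (k + 1) (run ++ [k]) := by simp [pvSegs]

theorem pvSegs_cons_match {c : Char} (cs : List Char) (k : Nat) (run : List Nat) (h : c ≠ '-') :
    pvSegs (c :: cs) k run = (run, k) :: pvSegs cs (k + 1) [] := by simp [pvSegs, h]

theorem pvSegs_row (S : List Char) (Q : List Char) : ∀ (k : Nat) (run : List Nat),
    ((pvSegs Q k run).filter (fun p => decide (p.2 < S.length))).map (fun p => pvCnt S p.1)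
      = pvSpecZ ((S.drop k).zip Q) (pvCnt S run) := by
  induction Q with
  | nil => intro k run; simp [pvSegs, pvSpecZ]
  | cons q qs ih =>
    intro k run
    by_cases hq : q = '-'
    · subst hq
      rw [pvSegs_cons_gap, ih]
      by_cases hk : k < S.length
      · have hdrop : S.drop k = S[k] :: S.drop (k + 1) := List.drop_eq_getElem_cons hk
        have hget : S.getD k '-' = S[k] := List.getD_eq_getElem S '-' hk
        rw [hdrop, List.zip_cons_cons]
        by_cases hs : S[k] = '-'
        · simp [pvSpecZ, hs, pvCnt_append, List.getElem?_eq_getElem hk]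
        · simp [pvSpecZ, hs, pvCnt_append, List.getElem?_eq_getElem hk]
      · have hdrop : S.drop k = [] := List.drop_eq_nil_of_le (by omega)
        have hdrop' : S.drop (k + 1) = [] := List.drop_eq_nil_of_le (by omega)
        rw [hdrop, hdrop']
        simp [pvSpecZ]
    · rw [pvSegs_cons_match _ _ _ hq, List.filter_cons]
      by_cases hk : k < S.length
      · have hdrop : S.drop k = S[k] :: S.drop (k + 1) := List.drop_eq_getElem_cons hk
        simp only [decide_eq_true_eq]
        rw [if_pos hk]
        simp only [List.map_cons]
        rw [ih, hdrop, List.zip_cons_cons]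
        have h0 : pvCnt S ([] : List Nat) = 0 := by simp [pvCnt]
        rw [h0]
        simp [pvSpecZ, hq]
      · have hdrop : S.drop k = [] := List.drop_eq_nil_of_le (by omega)
        have hdrop' : S.drop (k + 1) = [] := List.drop_eq_nil_of_le (by omega)
        simp only [decide_eq_true_eq]
        rw [if_neg hk]
        rw [ih, hdrop, hdrop']
        simp [pvSpecZ]

theorem pvRow_eq (S Q : List Char) :
    pvAGo (S.zip Q) [] 0
      = ((pvSegs Q 0 []).filter (fun p => decide (p.2 < S.length))).map (fun p => pvCnt S p.1) := by
  rw [pvAGo_eq, pvSegs_row]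
  simp [pvCnt]

-- ===== VERDICT (by name: the statement is the Claim_ definition above) =====
theorem compute_deletion_matrix_spec : Claim_equal_compute_deletion_matrix := by
  intro alignments _ hpre
  unfold Spec_compute_deletion_matrix
  cases alignments with
  | nil => exact absurd rfl hpre
  | cons q rest =>
    simp only [compute_deletion_matrix, compute_deletion_matrix_alt]
    exact List.map_congr_left (fun s _ => pvRow_eq s.toList q.toList)
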